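-- pv_equiv track=rewrite | github.com/beaver71/asn1tools | asn1tools/c_source/uper.py | _indent_lines
-- ===== SOURCE A (Python) =====
-- def _strip_blank_lines(lines):
--     try:
--         while lines[0] == '':
--             del lines[0]
--
--         while lines[-1] == '':
--             del lines[-1]
--     except IndexError:
--         pass
--
--     stripped = []
--
--     for line in lines:
--         if line == '' and stripped[-1] == '':
--             continue
--
--         stripped.append(line)
--
--     return stripped
--
-- def _indent_lines(lines):
--     indented_lines = []
--
--     for line in lines:
--         if line:
--             indented_line = 4 * ' ' + line
--         else:
--             indented_line = line
--
--         indented_lines.append(indented_line)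
--
--     return _strip_blank_lines(indented_lines)
-- ===== SOURCE B (Python) =====
-- def _indent_lines(lines):
--     result = []
--     for line in lines:
--         if line:
--             result.append('    ' + line)
--         elif result and result[-1] != '':
--             result.append('')
--         # else: blank line at the start or after another blank -- drop it
--
--     while result and result[-1] == '':
--         result.pop()
--
--     return result
-- ===== Notes on version B (the rewrite author's own statement) =====
-- stated objective: simpler
-- what changed: Replaces the build-full-indented-list + three separate stripping loops (del-front, del-back, collapse pass) with one fused forward pass that indents and decides keep/skip inline, followed by a single trailing-blank pop loop.
import Mathlib
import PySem

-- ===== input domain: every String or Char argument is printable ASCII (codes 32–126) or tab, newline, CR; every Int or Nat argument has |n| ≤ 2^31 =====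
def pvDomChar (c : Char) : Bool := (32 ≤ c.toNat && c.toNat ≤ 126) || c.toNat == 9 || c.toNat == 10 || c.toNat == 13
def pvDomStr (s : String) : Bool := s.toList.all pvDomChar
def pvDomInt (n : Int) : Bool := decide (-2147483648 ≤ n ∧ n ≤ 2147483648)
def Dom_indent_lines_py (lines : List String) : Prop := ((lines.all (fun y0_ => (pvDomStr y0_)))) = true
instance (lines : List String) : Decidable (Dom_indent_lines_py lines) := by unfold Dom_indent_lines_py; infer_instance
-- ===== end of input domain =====

-- B fuses A's indent pass and three stripping loops into one forward pass plus a trailing pop loop (objective: simpler).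

-- ===== PORT A =====
-- while lines[0] == '': del lines[0]
def dropLeadingBlanks : List String → List String
  | [] => []                                   -- IndexError on empty list is caught: pass
  | x :: xs => if x = "" then dropLeadingBlanks xs else x :: xs

-- for line in lines: if line == '' and stripped[-1] == '': continue; stripped.append(line)
-- (stripped[-1] with stripped == [] would raise in Python; getLast? [] = none makes the
--  condition false here; that state is unreachable from _indent_lines, which strips leading blanks first)
def collapseLoop : List String → List String → List String
  | stripped, [] => stripped
  | stripped, line :: rest =>
    if line = "" ∧ stripped.getLast? = some "" then collapseLoop stripped rest
    else collapseLoop (stripped ++ [line]) rest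

def stripBlankLines (lines : List String) : List String :=
  let l1 := dropLeadingBlanks lines                      -- delete leading ''
  let l2 := (dropLeadingBlanks l1.reverse).reverse       -- while lines[-1] == '': del lines[-1]
  collapseLoop [] l2

-- for line in lines: indented_line = 4*' ' + line if line else line; append
def indentLoop : List String → List String → List String
  | acc, [] => acc
  | acc, line :: rest =>
    if line ≠ "" then indentLoop (acc ++ ["    " ++ line]) rest
    else indentLoop (acc ++ [line]) rest

def indent_lines_py (lines : List String) : List String :=
  stripBlankLines (indentLoop [] lines)

-- ===== PORT B =====
-- single fused pass: indent and decide keep/skip inline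
def bLoop : List String → List String → List String
  | result, [] => result
  | result, line :: rest =>
    if line ≠ "" then bLoop (result ++ ["    " ++ line]) rest
    else if result ≠ [] ∧ result.getLast? ≠ some "" then bLoop (result ++ [""]) rest
    else bLoop result rest

-- while result and result[-1] == '': result.pop()
def popTrailing (result : List String) : List String :=
  (result.reverse.dropWhile (· == "")).reverse

def indent_lines_py_alt (lines : List String) : List String :=
  popTrailing (bLoop [] lines)

-- ===== PRECONDITION & SPEC =====
def Spec_indent_lines_py (lines : List String) (out : List String) : Prop := out = indent_lines_py_alt lines
instance (lines : List String) (out : List String) : Decidable (Spec_indent_lines_py lines out) := by unfold Spec_indent_lines_py; infer_instance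

-- ===== CLAIM (what is proved, stated in full; the proofs are below) =====
def Claim_equal_indent_lines_py : Prop := ∀ (lines : List String), Dom_indent_lines_py lines → Spec_indent_lines_py lines (indent_lines_py lines)

-- ===== LEMMAS AND PROOFS =====

-- canonical collapse function: s = "nothing kept yet, or last kept element is blank"
def gColl : Bool → List String → List String
  | _, [] => []
  | s, x :: xs => if x = "" then (if s then gColl s xs else "" :: gColl true xs) else x :: gColl false xs

def fInd (line : String) : String := if line = "" then line else "    " ++ line

def rstrip (l : List String) : List String := (l.reverse.dropWhile (· == "")).reverse

theorem four_append_ne (line : String) : "    " ++ line ≠ "" := by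
  intro h
  have := congrArg String.length h
  simp [String.length_append] at this

theorem dropLeadingBlanks_eq (l : List String) :
    dropLeadingBlanks l = l.dropWhile (· == "") := by
  induction l with
  | nil => rfl
  | cons x xs ih =>
    by_cases hx : x = "" <;> simp [dropLeadingBlanks, hx, ih]

theorem indentLoop_eq (l : List String) (acc : List String) :
    indentLoop acc l = acc ++ l.map fInd := by
  induction l generalizing acc with
  | nil => simp [indentLoop]
  | cons x xs ih =>
    by_cases hx : x = "" <;> simp [indentLoop, hx, ih, fInd]

theorem collapseLoop_eq (l : List String) (acc : List String) :
    collapseLoop acc l = acc ++ gColl (acc.getLast? == some "") l := by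
  induction l generalizing acc with
  | nil => simp [collapseLoop, gColl]
  | cons x xs ih =>
    by_cases hx : x = ""
    · by_cases hs : acc.getLast? = some ""
      · simp [collapseLoop, hx, hs, gColl, ih]
      · simp [collapseLoop, hx, hs, gColl, ih, List.getLast?_append]
    · have hb : (x == "") = false := by simp [hx]
      simp [collapseLoop, hx, gColl, ih, List.getLast?_append, hb]

theorem bLoop_eq (l : List String) (acc : List String) :
    bLoop acc l = acc ++ gColl (acc.isEmpty || acc.getLast? == some "") (l.map fInd) := by
  induction l generalizing acc with
  | nil => simp [bLoop, gColl]
  | cons x xs ih =>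
    by_cases hx : x = ""
    · by_cases he : acc = []
      · simp [bLoop, hx, he, fInd, gColl, ih]
      · by_cases hs : acc.getLast? = some ""
        · simp [bLoop, hx, he, hs, fInd, gColl, ih]
        · simp [bLoop, hx, he, hs, fInd, gColl, ih, List.getLast?_append]
    · have hb : ("    " ++ x == "") = false := by simp [four_append_ne x]
      have he2 : (acc ++ ["    " ++ x]).isEmpty = false := by simp
      simp [bLoop, hx, fInd, four_append_ne x, gColl, ih, List.getLast?_append, hb, he2]

-- gColl with flag true skips leading blanks
theorem gColl_true_eq (l : List String) :
    gColl true l = gColl false (l.dropWhile (· == "")) := by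
  induction l with
  | nil => rfl
  | cons x xs ih =>
    by_cases hx : x = "" <;> simp [gColl, hx, ih]

theorem rstrip_all_blank (l : List String) (h : ∀ y ∈ l, y = "") : rstrip l = [] := by
  have : l.reverse.dropWhile (· == "") = [] := by
    rw [List.dropWhile_eq_nil_iff]
    intro x hx; simpa using h x (List.mem_reverse.mp hx)
  simp [rstrip, this]

theorem rstrip_cons_ne (x : String) (l : List String) (hx : x ≠ "") :
    rstrip (x :: l) = x :: rstrip l := by
  simp only [rstrip, List.reverse_cons, List.dropWhile_append]
  by_cases he : (l.reverse.dropWhile (· == "")).isEmpty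
  · simp_all [List.isEmpty_iff]
  · simp [he]

theorem rstrip_cons_exists (x : String) (l : List String) (h : ∃ y ∈ l, y ≠ "") :
    rstrip (x :: l) = x :: rstrip l := by
  have hne : l.reverse.dropWhile (· == "") ≠ [] := by
    rw [Ne, List.dropWhile_eq_nil_iff]
    obtain ⟨y, hy, hy'⟩ := h
    intro hall
    exact hy' (by simpa using hall y (List.mem_reverse.mpr hy))
  simp only [rstrip, List.reverse_cons, List.dropWhile_append, List.isEmpty_iff, hne,
    if_false, List.reverse_append, List.reverse_cons, List.reverse_nil, List.nil_append]
  rfl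

theorem gColl_true_all_blank (l : List String) (h : ∀ y ∈ l, y = "") : gColl true l = [] := by
  induction l with
  | nil => rfl
  | cons x xs ih =>
    have hx : x = "" := h x (by simp)
    simp only [gColl, hx, if_true]
    exact ih (fun y hy => h y (by simp [hy]))

theorem mem_gColl_of_ne (y : String) (l : List String) (s : Bool) (hy : y ∈ l) (hne : y ≠ "") :
    y ∈ gColl s l := by
  induction l generalizing s with
  | nil => simp at hy
  | cons x xs ih =>
    rcases List.mem_cons.mp hy with h | h
    · subst h; simp [gColl, hne]
    · by_cases hx : x = ""
      · cases s <;> simp [gColl, hx] <;> [skip; skip] <;> first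
          | exact Or.inr (ih _ h)
          | exact ih _ h
      · simp only [gColl, if_neg hx]
        exact List.mem_cons.mpr (Or.inr (ih _ h))

-- main lemma: popping trailing blanks after collapsing = collapsing after stripping trailing blanks
theorem rstrip_gColl (l : List String) (s : Bool) :
    rstrip (gColl s l) = gColl s (rstrip l) := by
  induction l generalizing s with
  | nil => simp [gColl, rstrip]
  | cons x xs ih =>
    by_cases hx : x = ""
    · subst hx
      by_cases hall : ∀ y ∈ xs, y = ""
      · have h1 : gColl true xs = [] := gColl_true_all_blank xs hall
        have h2 : rstrip ("" :: xs) = [] := by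
          apply rstrip_all_blank
          intro y hy
          rcases List.mem_cons.mp hy with h | h
          · exact h
          · exact hall y h
        cases s
        · rw [show gColl false ("" :: xs) = "" :: gColl true xs from by simp [gColl], h1, h2]
          simp [rstrip, gColl]
        · rw [show gColl true ("" :: xs) = gColl true xs from by simp [gColl], h1, h2]
          simp [rstrip, gColl]
      · rw [not_forall] at hall
        simp only [Classical.not_imp] at hall
        obtain ⟨y, hy, hy'⟩ := hall
        have hmem : ∃ z ∈ gColl true xs, z ≠ "" := ⟨y, mem_gColl_of_ne y xs true hy hy', hy'⟩
        have hrs : rstrip ("" :: xs) = "" :: rstrip xs := rstrip_cons_exists _ _ ⟨y, hy, hy'⟩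
        cases s
        · rw [show gColl false ("" :: xs) = "" :: gColl true xs from by simp [gColl],
            rstrip_cons_exists _ _ hmem, ih true, hrs]
          simp [gColl]
        · rw [show gColl true ("" :: xs) = gColl true xs from by simp [gColl], ih true, hrs]
          simp [gColl]
    · simp only [gColl, if_neg hx, rstrip_cons_ne x _ hx, ih false]

-- ===== VERDICT (by name: the statement is the Claim_ definition above) =====
theorem indent_lines_py_spec : Claim_equal_indent_lines_py := by
  intro lines _
  unfold Spec_indent_lines_py indent_lines_py indent_lines_py_alt stripBlankLines popTrailing
  rw [indentLoop_eq, bLoop_eq, collapseLoop_eq]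
  simp only [List.nil_append, List.isEmpty_nil, List.getLast?_nil, Bool.true_or]
  have h1 : (dropLeadingBlanks ((dropLeadingBlanks ((lines.map fInd))).reverse)).reverse
      = rstrip ((lines.map fInd).dropWhile (· == "")) := by
    rw [dropLeadingBlanks_eq, dropLeadingBlanks_eq]; rfl
  rw [h1]
  have h2 : ((gColl true (lines.map fInd)).reverse.dropWhile (· == "")).reverse
      = rstrip (gColl true (lines.map fInd)) := rfl
  rw [h2, gColl_true_eq, rstrip_gColl]
  simp
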